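-- pv_equiv track=rewrite | github.com/TalDugma/Data-Extraction-Mindray-Monitor | NumberRecognition/number_recognition.py | get_ecg
-- ===== SOURCE A (Python) =====
-- def get_ecg(ecg):
--     result=0
--     if len(ecg)<1 or len(ecg)>3:
--         return 0
--     for ((number,tag),loctaion) in ecg:
--         result*=10
--         result+=tag
--     return result
-- ===== SOURCE B (Python) =====
-- def get_ecg(ecg):
--     if len(ecg) < 1 or len(ecg) > 3:
--         return 0
--     tags = [tag for ((number, tag), location) in ecg]
--     n = len(tags)
--     return sum(t * 10 ** (n - 1 - i) for i, t in enumerate(tags))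
-- ===== Notes on version B (the rewrite author's own statement) =====
-- stated objective: alternative
-- what changed: Replaces the running Horner accumulator (result = result*10 + tag) with explicit place-value weights: extract the tags in order and sum t * 10**(n-1-i) over enumerate(tags).
import Mathlib
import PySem

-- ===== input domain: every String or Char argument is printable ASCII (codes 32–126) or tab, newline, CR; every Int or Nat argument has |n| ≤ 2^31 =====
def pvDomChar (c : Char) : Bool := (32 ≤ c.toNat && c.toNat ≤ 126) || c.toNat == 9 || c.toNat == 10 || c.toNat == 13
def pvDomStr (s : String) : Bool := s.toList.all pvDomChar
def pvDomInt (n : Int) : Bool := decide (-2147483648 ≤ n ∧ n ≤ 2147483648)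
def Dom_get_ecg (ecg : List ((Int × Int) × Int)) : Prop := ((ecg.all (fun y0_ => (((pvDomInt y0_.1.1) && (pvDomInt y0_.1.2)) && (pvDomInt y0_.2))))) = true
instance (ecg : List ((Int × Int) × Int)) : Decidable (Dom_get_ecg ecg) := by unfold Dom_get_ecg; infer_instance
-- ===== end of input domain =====

-- B replaces A's Horner accumulator with an explicit place-value weighted sum (alternative decomposition, same cost).


-- ===== PORT A =====
def get_ecg (ecg : List ((Int × Int) × Int)) : Int :=
  if ecg.length < 1 || ecg.length > 3 then 0
  else ecg.foldl (fun result x => result * 10 + x.1.2) 0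

-- ===== PORT B =====
def get_ecg_alt (ecg : List ((Int × Int) × Int)) : Int :=
  if ecg.length < 1 || ecg.length > 3 then 0
  else
    let tags := ecg.map (fun x => x.1.2)
    let n := tags.length
    (PySem.List.enumerate tags).foldl (fun s it => s + it.2 * 10 ^ (n - 1 - it.1.toNat)) 0

-- ===== PRECONDITION & SPEC =====
def Spec_get_ecg (ecg : List ((Int × Int) × Int)) (out : Int) : Prop := out = get_ecg_alt ecg
instance (ecg : List ((Int × Int) × Int)) (out : Int) : Decidable (Spec_get_ecg ecg out) := by unfold Spec_get_ecg; infer_instance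

-- ===== CLAIM (what is proved, stated in full; the proofs are below) =====
def Claim_equal_get_ecg : Prop := ∀ (ecg : List ((Int × Int) × Int)), Dom_get_ecg ecg → Spec_get_ecg ecg (get_ecg ecg)

-- ===== LEMMAS AND PROOFS =====

-- ===== VERDICT (by name: the statement is the Claim_ definition above) =====
theorem get_ecg_spec : Claim_equal_get_ecg := by
  intro ecg _
  unfold Spec_get_ecg get_ecg get_ecg_alt
  rcases ecg with _ | ⟨a, _ | ⟨b, _ | ⟨c, _ | ⟨d, tl⟩⟩⟩⟩ <;>
    simp [PySem.List.enumerate, List.foldl] <;> ring
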